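-- pv_equiv track=rewrite | github.com/rmtew/amiga-reversing | m68k/os_calls.py | _finalize_segment_symbols
-- ===== SOURCE A (Python) =====
-- def _segment_label_disambiguator(address: int) -> str:
--     return f"{address:04X}" if address <= 0xFFFF else f"{address:08X}"
--
-- def _finalize_segment_symbols(symbol_candidates: dict[int, set[str]]) -> dict[int, str]:
--     resolved: dict[int, str] = {}
--     grouped_symbols: dict[str, list[int]] = {}
--     for address, symbols in symbol_candidates.items():
--         if len(symbols) != 1:
--             raise ValueError(
--                 f"Conflicting typed segment names for ${address:08X}: {sorted(symbols)}")
--         symbol = next(iter(symbols))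
--         grouped_symbols.setdefault(symbol, []).append(address)
--     for symbol, addrs in grouped_symbols.items():
--         if len(addrs) == 1:
--             resolved[addrs[0]] = symbol
--             continue
--         for address in sorted(addrs):
--             resolved[address] = f"{symbol}_{_segment_label_disambiguator(address)}"
--     return resolved
-- ===== SOURCE B (Python) =====
-- def _segment_label_disambiguator(address: int) -> str:
--     return f"{address:04X}" if address <= 0xFFFF else f"{address:08X}"
--
--
-- def _finalize_segment_symbols(symbol_candidates: dict[int, set[str]]) -> dict[int, str]:
--     # Pass 1: validate and flatten to (address, symbol) entries.
--     entries = []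
--     for address, symbols in symbol_candidates.items():
--         if len(symbols) != 1:
--             raise ValueError(
--                 f"Conflicting typed segment names for ${address:08X}: {sorted(symbols)}")
--         entries.append((address, next(iter(symbols))))
--     # Sort entries so duplicates of a symbol come out address-ordered, blocks in
--     # first-appearance order; then emit everything in one flat pass.
--     symbol_order = list(dict.fromkeys(symbol for _, symbol in entries))
--     counts = {}
--     for _, symbol in entries:
--         counts[symbol] = counts.get(symbol, 0) + 1
--     entries.sort(key=lambda entry: (symbol_order.index(entry[1]), entry[0]))
--     return {
--         address: symbol if counts[symbol] == 1
--         else f"{symbol}_{_segment_label_disambiguator(address)}"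
--         for address, symbol in entries
--     }
-- ===== Notes on version B (the rewrite author's own statement) =====
-- stated objective: alternative
-- what changed: B replaces A's dict-of-lists grouping and nested group loop by a flat pipeline: flatten to (address, symbol) entries, count symbols with a frequency dict, sort the entries once by (first-appearance rank of symbol, address), and emit the result in a single flat pass over the sorted entries.
import Mathlib
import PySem

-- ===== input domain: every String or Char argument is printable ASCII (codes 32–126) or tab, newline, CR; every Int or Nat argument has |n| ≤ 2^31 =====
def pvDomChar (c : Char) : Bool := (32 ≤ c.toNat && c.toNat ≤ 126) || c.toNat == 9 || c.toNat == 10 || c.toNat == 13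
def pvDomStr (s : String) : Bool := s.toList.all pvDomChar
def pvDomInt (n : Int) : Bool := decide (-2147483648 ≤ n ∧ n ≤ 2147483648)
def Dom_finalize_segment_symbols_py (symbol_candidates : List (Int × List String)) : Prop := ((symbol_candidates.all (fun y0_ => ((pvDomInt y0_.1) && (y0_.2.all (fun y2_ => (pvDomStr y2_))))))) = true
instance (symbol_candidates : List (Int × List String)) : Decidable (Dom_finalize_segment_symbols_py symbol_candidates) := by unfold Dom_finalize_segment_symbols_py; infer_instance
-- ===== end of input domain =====

-- B re-implements A as one flat sort-then-emit pipeline instead of a dict-of-lists grouping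
-- with a nested loop over groups; equal return value (same list) on all inputs admitted by Pre_.

-- ===== PORT A =====
-- shared helper: port of _segment_label_disambiguator (both Pythons call it).
-- f"{n:04X}" / f"{n:08X}" ported by hand: uppercase hex digits of |n|, '-' in front for
-- negative n, zero-padded with Python's zfill rule (exact for every Int).
def pvHexDigit (d : Nat) : Char := if d < 10 then Char.ofNat (48 + d) else Char.ofNat (55 + d)

def pvHexChars (n : Nat) : List Char :=
  if h : n = 0 then [] else pvHexChars (n / 16) ++ [pvHexDigit (n % 16)]
decreasing_by exact Nat.div_lt_self (Nat.pos_of_ne_zero h) (by omega)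

def pvHexFmt (n : Int) (w : Int) : String :=
  let digits := if n = 0 then ['0'] else pvHexChars n.natAbs
  PySem.Str.zfill (String.ofList (if n < 0 then '-' :: digits else digits)) w

def segment_label_disambiguator_py (address : Int) : String :=
  if address ≤ 0xFFFF then pvHexFmt address 4 else pvHexFmt address 8

def finalize_segment_symbols_py (symbol_candidates : List (Int × List String)) : List (Int × String) :=
  -- first loop: grouped_symbols.setdefault(symbol, []).append(address); none = ValueError raised
  let grouped? : Option (PySem.Dict String (List Int)) :=
    symbol_candidates.foldl (fun og p => og.bind (fun g =>
      if PySem.List.len p.2 ≠ 1 then none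
      else some (g.modify p.2.headI [] (fun cur => cur ++ [p.1])))) (some PySem.Dict.empty)
  match grouped? with
  | none => []   -- unreachable under Pre_ (A raises ValueError)
  | some grouped =>
    -- second loop: fill `resolved`
    (grouped.items.foldl (fun (res : PySem.Dict Int String) g =>
      if g.2.length = 1 then res.insert (PySem.List.pyGetD g.2 0 0) g.1
      else (PySem.List.sorted g.2 (fun a => a) false).foldl
             (fun r a => r.insert a (g.1 ++ "_" ++ segment_label_disambiguator_py a)) res)
      PySem.Dict.empty).items

-- ===== PORT B =====
def finalize_segment_symbols_py_alt (symbol_candidates : List (Int × List String)) : List (Int × String) :=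
  -- pass 1: validate and flatten to entries; none = ValueError raised
  let entries? : Option (List (Int × String)) :=
    symbol_candidates.foldl (fun oe p => oe.bind (fun e =>
      if PySem.List.len p.2 ≠ 1 then none
      else some (e ++ [(p.1, p.2.headI)]))) (some [])
  match entries? with
  | none => []   -- unreachable under Pre_ (B raises ValueError)
  | some entries =>
    let symbol_order := PySem.List.dedup (entries.map (fun e => e.2))
    let counts : PySem.Dict String Int :=
      entries.foldl (fun d e => d.insert e.2 (d.getD e.2 0 + 1)) PySem.Dict.empty
    let sortedEntries := PySem.List.sorted2 entries
        (fun e => (((PySem.List.index? symbol_order e.2).getD 0 : Nat) : Int))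
        (fun e => e.1) false
    (sortedEntries.foldl
      (fun (res : PySem.Dict Int String) e =>
        res.insert e.1 (if counts.getD e.2 0 = 1 then e.2
                        else e.2 ++ "_" ++ segment_label_disambiguator_py e.1))
      PySem.Dict.empty).items

-- ===== PRECONDITION & SPEC =====
-- Pre_ excludes (i) inputs where some candidate set does not have exactly one symbol — there
-- both Pythons raise the same ValueError — and (ii) duplicate addresses, which cannot arise in
-- a Python dict[int, set[str]] argument.
def Pre_finalize_segment_symbols_py (symbol_candidates : List (Int × List String)) : Prop :=
  (symbol_candidates.map (fun p => p.1)).Nodup ∧ ∀ p ∈ symbol_candidates, p.2.length = 1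
instance (symbol_candidates : List (Int × List String)) : Decidable (Pre_finalize_segment_symbols_py symbol_candidates) := by unfold Pre_finalize_segment_symbols_py; infer_instance

def pvWitness_finalize_segment_symbols_py : (List (Int × List String)) :=
  [(3, ["seg"]), (1, ["seg"]), (70000, ["data"])]

def Spec_finalize_segment_symbols_py (symbol_candidates : List (Int × List String)) (out : List (Int × String)) : Prop := out = finalize_segment_symbols_py_alt symbol_candidates
instance (symbol_candidates : List (Int × List String)) (out : List (Int × String)) : Decidable (Spec_finalize_segment_symbols_py symbol_candidates out) := by unfold Spec_finalize_segment_symbols_py; infer_instance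

-- ===== CLAIM (what is proved, stated in full; the proofs are below) =====
def Claim_equal_finalize_segment_symbols_py : Prop := ∀ (symbol_candidates : List (Int × List String)), Dom_finalize_segment_symbols_py symbol_candidates → Pre_finalize_segment_symbols_py symbol_candidates → Spec_finalize_segment_symbols_py symbol_candidates (finalize_segment_symbols_py symbol_candidates)

-- ===== LEMMAS AND PROOFS =====

-- Abbreviations for the common intermediate data (proof-only).
def pvEnt (c : List (Int × List String)) : List (Int × String) := c.map (fun p => (p.1, p.2.headI))
def pvSyms (l : List (Int × String)) : List String := l.map (fun e => e.2)
def pvAddrs (l : List (Int × String)) (s : String) : List Int :=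
  (l.filter (fun e => e.2 == s)).map (fun e => e.1)
def pvU (l : List (Int × String)) : List String := PySem.Set.ofList (pvSyms l)
def pvSeq (l : List (Int × String)) : List (Int × String) :=
  (pvU l).flatMap (fun s => (PySem.List.sorted (pvAddrs l s) (fun a => a) false).map (fun a => (a, s)))
def pvLab (l : List (Int × String)) (e : Int × String) : Int × String :=
  (e.1, if (pvSyms l).count e.2 = 1 then e.2 else e.2 ++ "_" ++ segment_label_disambiguator_py e.1)


-- generic Option-threading removal: under Pre_ the ValueError branch never fires
theorem pvFoldOpt {β : Type} (step : β → (Int × List String) → β)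
    (c : List (Int × List String)) (d : β) (h : ∀ p ∈ c, p.2.length = 1) :
    c.foldl (fun ob p => ob.bind (fun b =>
      if PySem.List.len p.2 ≠ 1 then none else some (step b p))) (some d)
    = some (c.foldl step d) := by
  induction c generalizing d with
  | nil => rfl
  | cons p t ih =>
    simp only [List.foldl_cons, Option.bind_some]
    rw [if_neg (by simp [PySem.List.len_eq, h p (by simp)])]
    exact ih _ (fun q hq => h q (by simp [hq]))

-- the filter of entries with symbol s is exactly its address list re-paired with s
theorem pvFilterSnd (l : List (Int × String)) (s : String) :
    (pvAddrs l s).map (fun a => (a, s)) = l.filter (fun e => e.2 == s) := by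
  induction l with
  | nil => rfl
  | cons e t ih =>
    by_cases h : e.2 = s
    · simp [pvAddrs, h] at ih ⊢
      exact ⟨(by cases e; simp_all), ih⟩
    · simp [pvAddrs, h] at ih ⊢
      simpa [pvAddrs] using ih

-- partition of a list by the distinct values of its second component is a permutation
theorem pvPartitionPerm (U : List String) (l : List (Int × String)) (hU : U.Nodup)
    (hcov : ∀ e ∈ l, e.2 ∈ U) :
    (U.flatMap (fun s => l.filter (fun e => e.2 == s))).Perm l := by
  induction U generalizing l with
  | nil =>
    have : l = [] := List.eq_nil_iff_forall_not_mem.mpr (fun e he => by simpa using hcov e he)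
    simp [this]
  | cons s t ih =>
    rw [List.flatMap_cons]
    have hst : ∀ u ∈ t, l.filter (fun e => e.2 == u)
        = (l.filter (fun e => !(e.2 == s))).filter (fun e => e.2 == u) := by
      intro u hu
      rw [List.filter_filter]
      refine (List.filter_congr (fun e _ => ?_)).symm
      by_cases h : e.2 = u
      · have : u ≠ s := fun h' => (List.nodup_cons.mp hU).1 (h' ▸ hu)
        simp [h, this]
      · simp [h]
    have hperm : (t.flatMap (fun u => l.filter (fun e => e.2 == u))).Perm
        (l.filter (fun e => !(e.2 == s))) := by
      have hrec := ih (l.filter (fun e => !(e.2 == s))) (List.nodup_cons.mp hU).2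
        (fun e he => by
          have hm := List.mem_filter.mp he
          have := hcov e hm.1
          simp only [List.mem_cons] at this
          rcases this with h | h
          · exfalso
            have h2 := hm.2
            rw [h] at h2
            simp at h2
          · exact h)
      have heq : t.flatMap (fun u => l.filter (fun e => e.2 == u))
          = t.flatMap (fun u => (l.filter (fun e => !(e.2 == s))).filter (fun e => e.2 == u)) := by
        apply List.flatMap_congr
        intro u hu
        exact hst u hu
      rw [heq]
      exact hrec
    exact List.Perm.trans (List.Perm.append_left _ hperm) (List.filter_append_perm _ l)

-- every entry's symbol is one of the distinct symbols
theorem pvCov (l : List (Int × String)) : ∀ e ∈ l, e.2 ∈ pvU l := by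
  intro e he
  rw [pvU, PySem.Set.mem_ofList, pvSyms]
  exact List.mem_map.mpr ⟨e, he, rfl⟩

-- pvSeq is a permutation of the entry list
theorem pvSeqPerm (l : List (Int × String)) : (pvSeq l).Perm l := by
  refine List.Perm.trans (List.Perm.flatMap_left (pvU l) ?_)
    (pvPartitionPerm (pvU l) l (by rw [pvU]; exact PySem.Set.nodup_ofList _) (pvCov l))
  intro s _
  rw [← pvFilterSnd]
  exact List.Perm.map _ (PySem.List.sorted_perm _ _ _)

theorem pvIndexGetElem (U : List String) (hU : U.Nodup) (i : Nat) (h : i < U.length) :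
    PySem.List.index? U U[i] = some i := by
  rw [PySem.List.index?_eq_idxOf?, List.idxOf?_eq_some_iff]
  exact ⟨h, rfl, fun j hj heq => by
    have := (List.Nodup.getElem_inj_iff hU).mp heq
    omega⟩

-- strictly increasing first-appearance index along a Nodup list
theorem pvIdxPairwise (U : List String) (hU : U.Nodup) :
    U.Pairwise (fun s t => ((PySem.List.index? U s).getD 0 : Nat) < (PySem.List.index? U t).getD 0) := by
  rw [List.pairwise_iff_getElem]
  intro i j hi hj hij
  rw [pvIndexGetElem U hU i hi, pvIndexGetElem U hU j hj]
  simpa using hij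

-- blocks with constant symbol and strictly increasing addresses, glued along strictly
-- increasing symbol indices, are lexicographically strictly increasing
theorem pvBlocksPairwise (idxv : String → Int) (blk : String → List (Int × String))
    (V : List String)
    (hb : ∀ s ∈ V, (blk s).Pairwise (fun a b => a.1 < b.1))
    (hs : ∀ s ∈ V, ∀ e ∈ blk s, e.2 = s)
    (hinc : V.Pairwise (fun s t => idxv s < idxv t)) :
    (V.flatMap blk).Pairwise
      (fun a b => toLex (idxv a.2, a.1) < toLex (idxv b.2, b.1)) := by
  induction V with
  | nil => simp
  | cons s t ih =>
    rw [List.flatMap_cons, List.pairwise_append]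
    refine ⟨?_, ?_, ?_⟩
    · refine List.Pairwise.imp_of_mem ?_ (hb s (by simp))
      intro a b ha hb' hlt
      have h2a := hs s (by simp) a ha
      have h2b := hs s (by simp) b hb'
      simp only [Prod.Lex.lt_iff, ofLex_toLex]
      exact Or.inr ⟨by rw [h2a, h2b], hlt⟩
    · exact ih (fun u hu => hb u (by simp [hu])) (fun u hu => hs u (by simp [hu]))
        (List.pairwise_cons.mp hinc).2
    · intro a ha b hbm
      obtain ⟨u, hu, hbu⟩ := List.mem_flatMap.mp hbm
      have h2a := hs s (by simp) a ha
      have h2b := hs u (by simp [hu]) b hbu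
      simp only [Prod.Lex.lt_iff, ofLex_toLex]
      exact Or.inl (by rw [h2a, h2b]; exact (List.pairwise_cons.mp hinc).1 u hu)

-- sorted2 with Int keys is sorting by the lexicographic pair key
theorem pvSorted2Lex {α : Type} (xs : List α) (k1 k2 : α → Int) :
    PySem.List.sorted2 xs k1 k2 false
    = PySem.List.sorted xs (fun x => toLex (k1 x, k2 x)) false := by
  have hb : (fun (a b : α) => decide (k1 a < k1 b) || (!decide (k1 b < k1 a) && decide (k2 a < k2 b)))
      = (fun a b => decide (toLex (k1 a, k2 a) < toLex (k1 b, k2 b))) := by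
    funext a b
    rw [Bool.eq_iff_iff]
    simp only [Prod.Lex.lt_iff, ofLex_toLex, Bool.or_eq_true, Bool.and_eq_true, Bool.not_eq_true',
      decide_eq_true_eq, decide_eq_false_iff_not]
    omega
  rw [PySem.List.sorted_eq_foldl_insertBy]
  show xs.foldl (fun acc x => PySem.List.insertBy
      (fun a b => decide (k1 a < k1 b) || (!decide (k1 b < k1 a) && decide (k2 a < k2 b))) x acc) [] = _
  rw [hb]

-- the symbol multiplicity is the length of its address list
theorem pvCount (l : List (Int × String)) (s : String) :
    (pvSyms l).count s = (pvAddrs l s).length := by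
  rw [pvSyms, pvAddrs, List.count_eq_countP, List.countP_map, List.length_map,
    ← List.countP_eq_length_filter]
  rfl

theorem pvAddrsNodup (l : List (Int × String)) (h : (l.map (fun e => e.1)).Nodup)
    (s : String) : (pvAddrs l s).Nodup := by
  have hsub : (pvAddrs l s).Sublist (l.map (fun e => e.1)) := by
    rw [pvAddrs]
    exact List.filter_sublist.map _
  exact hsub.nodup h

-- A's second loop, abstracted (proof-only names for the loop body and its emitted pairs)
def pvStep (res : PySem.Dict Int String) (g : String × List Int) : PySem.Dict Int String :=
  if g.2.length = 1 then res.insert (PySem.List.pyGetD g.2 0 0) g.1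
  else (PySem.List.sorted g.2 (fun a => a) false).foldl
         (fun r a => r.insert a (g.1 ++ "_" ++ segment_label_disambiguator_py a)) res

def pvEmit (g : String × List Int) : List (Int × String) :=
  if g.2.length = 1 then [(PySem.List.pyGetD g.2 0 0, g.1)]
  else (PySem.List.sorted g.2 (fun a => a) false).map
         (fun a => (a, g.1 ++ "_" ++ segment_label_disambiguator_py a))

theorem pvContainsFalse (d : PySem.Dict Int String) (k : Int) :
    d.contains k = false ↔ k ∉ d.keys := by
  rw [Bool.eq_false_iff]
  exact not_congr (PySem.Dict.contains_iff_mem_keys _ _)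

theorem pvStepKeys (res : PySem.Dict Int String) (g : String × List Int) (k : Int) :
    k ∈ (pvStep res g).keys ↔ k ∈ res.keys ∨ k ∈ g.2 := by
  unfold pvStep
  split_ifs with h
  · obtain ⟨a, ha⟩ := List.length_eq_one_iff.mp h
    rw [ha, PySem.List.pyGetD_zero_cons, PySem.Dict.mem_keys_insert]
    simp [or_comm]
  · rw [PySem.Dict.keys_foldl_insert, PySem.Set.mem_update, PySem.List.mem_sorted]

theorem pvPhase2 (gs : List (String × List Int)) (res : PySem.Dict Int String)
    (hnd : (gs.flatMap (fun g => g.2)).Nodup)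
    (hfresh : ∀ g ∈ gs, ∀ a ∈ g.2, res.contains a = false) :
    (gs.foldl pvStep res).items = res.items ++ gs.flatMap pvEmit := by
  induction gs generalizing res with
  | nil => simp
  | cons g t ih =>
    rw [List.flatMap_cons] at hnd
    obtain ⟨hnd1, hndt, hdisj⟩ := List.nodup_append.mp hnd
    have hstep : (pvStep res g).items = res.items ++ pvEmit g := by
      unfold pvStep pvEmit
      split_ifs with h
      · obtain ⟨a, ha⟩ := List.length_eq_one_iff.mp h
        rw [ha, PySem.List.pyGetD_zero_cons]
        exact PySem.Dict.items_insert_of_not_contains _ _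
          (hfresh g (by simp) a (by simp [ha]))
      · exact PySem.Dict.items_foldl_insert_fresh _ (fun a => a) _ res
          (fun a hm => hfresh g (by simp) a ((PySem.List.mem_sorted _ _ _ _).mp hm))
          (by simpa using ((PySem.List.sorted_perm g.2 (fun a => a) false).nodup_iff).mpr hnd1)
    rw [List.foldl_cons, List.flatMap_cons]
    rw [ih (pvStep res g) hndt ?_, hstep, List.append_assoc]
    intro g' hg' a ha
    rw [pvContainsFalse, pvStepKeys]
    push Not
    constructor
    · exact (pvContainsFalse res a).mp (hfresh g' (by simp [hg']) a ha)
    · intro hmem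
      exact hdisj a hmem a (List.mem_flatMap.mpr ⟨g', hg', ha⟩) rfl

-- A's grouping dict, abstracted, and its characterisation
def pvGroup (c : List (Int × List String)) : PySem.Dict String (List Int) :=
  c.foldl (fun g p => g.modify p.2.headI [] (fun cur => cur ++ [p.1])) PySem.Dict.empty

theorem pvGroupKeys (c : List (Int × List String)) : (pvGroup c).keys = pvU (pvEnt c) := by
  unfold pvGroup
  rw [PySem.Dict.keys_foldl_modify_key c (fun p => p.2.headI) []
    (fun _ p => fun cur => cur ++ [p.1]) PySem.Dict.empty]
  rw [PySem.Dict.keys_empty]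
  rw [show PySem.Set.update ([] : List String) (c.map fun p => p.2.headI)
      = PySem.Set.ofList (c.map fun p => p.2.headI) from PySem.Set.update_empty _]
  rw [pvU, pvSyms, pvEnt, List.map_map]
  rfl

theorem pvGroupGetD (c : List (Int × List String)) (s : String) :
    (pvGroup c).getD s [] = pvAddrs (pvEnt c) s := by
  unfold pvGroup
  rw [show c.foldl (fun g p => g.modify p.2.headI [] (fun cur => cur ++ [p.1])) PySem.Dict.empty
      = (c.map (fun p => (p.2.headI, p.1))).foldl
          (fun d q => d.modify q.1 [] (fun cur => cur ++ [q.2])) PySem.Dict.empty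
    from (List.foldl_map (f := fun p => (p.2.headI, p.1))
      (g := fun (d : PySem.Dict String (List Int)) q => d.modify q.1 [] (fun cur => cur ++ [q.2]))
      (l := c) (init := PySem.Dict.empty)).symm]
  rw [PySem.Dict.getD_foldl_modify_append, PySem.Dict.getD_empty]
  rw [pvAddrs, pvEnt, List.filter_map, List.filter_map, List.map_map, List.map_map]
  rfl

theorem pvGroupItems (c : List (Int × List String)) :
    (pvGroup c).items = (pvU (pvEnt c)).map (fun s => (s, pvAddrs (pvEnt c) s)) := by
  rw [PySem.Dict.items_eq_map_keys (pvGroup c)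
    (by rw [pvGroupKeys, pvU]; exact PySem.Set.nodup_ofList _) []]
  rw [pvGroupKeys]
  exact List.map_congr_left (fun s _ => by rw [pvGroupGetD])

theorem pvFlatAddrsNodup (l : List (Int × String)) (h : (l.map (fun e => e.1)).Nodup) :
    ((pvU l).flatMap (fun s => pvAddrs l s)).Nodup := by
  have heq : (pvU l).flatMap (fun s => pvAddrs l s)
      = ((pvU l).flatMap (fun s => l.filter (fun e => e.2 == s))).map (fun e => e.1) := by
    rw [List.map_flatMap]
    apply List.flatMap_congr
    intro s _
    rfl
  rw [heq]
  exact (List.Perm.nodup_iff ((pvPartitionPerm (pvU l) l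
    (by rw [pvU]; exact PySem.Set.nodup_ofList _) (pvCov l)).map (fun e => e.1))).mpr h

-- A's per-group emission is B's per-entry labelling
theorem pvEmitFlat (l : List (Int × String)) :
    ((pvU l).map (fun s => (s, pvAddrs l s))).flatMap pvEmit = (pvSeq l).map (pvLab l) := by
  rw [List.flatMap_map, pvSeq, List.map_flatMap]
  apply List.flatMap_congr
  intro s _
  by_cases h1 : (pvAddrs l s).length = 1
  · obtain ⟨a, ha⟩ := List.length_eq_one_iff.mp h1
    have hc : (pvSyms l).count s = 1 := by rw [pvCount, h1]
    simp only [pvEmit, ha]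
    norm_num
    rw [show PySem.List.sorted [a] (fun x => x) false = [a] from rfl]
    simp [pvLab, hc]
  · have hc : ¬ (pvSyms l).count s = 1 := by rw [pvCount]; exact h1
    simp only [pvEmit]
    rw [if_neg (by simpa using h1), List.map_map]
    exact List.map_congr_left (fun a _ => by simp [pvLab, hc])

theorem pvMainA (c : List (Int × List String)) (h : Pre_finalize_segment_symbols_py c) :
    finalize_segment_symbols_py c = (pvSeq (pvEnt c)).map (pvLab (pvEnt c)) := by
  obtain ⟨hnodup, hlen⟩ := h
  have hgr := pvFoldOpt (fun g p => g.modify p.2.headI [] (fun cur => cur ++ [p.1]))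
    c PySem.Dict.empty hlen
  simp only [finalize_segment_symbols_py, hgr]
  show ((pvGroup c).items.foldl pvStep PySem.Dict.empty).items = _
  rw [pvGroupItems]
  rw [pvPhase2 _ PySem.Dict.empty ?_ (fun g _ a _ => PySem.Dict.contains_empty a)]
  · rw [show (PySem.Dict.empty : PySem.Dict Int String).items = [] from rfl, List.nil_append]
    exact pvEmitFlat (pvEnt c)
  · rw [List.flatMap_map]
    exact pvFlatAddrsNodup (pvEnt c) (by rw [pvEnt, List.map_map]; exact hnodup)

theorem pvMainB (c : List (Int × List String)) (h : Pre_finalize_segment_symbols_py c) :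
    finalize_segment_symbols_py_alt c = (pvSeq (pvEnt c)).map (pvLab (pvEnt c)) := by
  obtain ⟨hnodup, hlen⟩ := h
  have hent := pvFoldOpt (fun e p => e ++ [(p.1, p.2.headI)]) c [] hlen
  rw [show c.foldl (fun e p => e ++ [(p.1, p.2.headI)]) []
      = pvEnt c from by
    rw [PySem.List.foldl_append_singleton_eq_map, List.nil_append, pvEnt]] at hent
  simp only [finalize_segment_symbols_py_alt, hent]
  have hso : PySem.List.dedup ((pvEnt c).map (fun e => e.2)) = pvU (pvEnt c) := by
    rw [PySem.List.dedup_eq_ofList]; rfl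
  rw [hso]
  have hentnd : ((pvEnt c).map (fun e => e.1)).Nodup := by
    rw [pvEnt, List.map_map]; exact hnodup
  have hsorted : PySem.List.sorted2 (pvEnt c)
      (fun e => (((PySem.List.index? (pvU (pvEnt c)) e.2).getD 0 : Nat) : Int))
      (fun e => e.1) false = pvSeq (pvEnt c) := by
    rw [pvSorted2Lex]
    apply PySem.List.sorted_eq_of_perm_of_pairwise_lt
    · exact pvSeqPerm (pvEnt c)
    · rw [pvSeq]
      apply pvBlocksPairwise
        (fun s => (((PySem.List.index? (pvU (pvEnt c)) s).getD 0 : Nat) : Int))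
        (fun s => (PySem.List.sorted (pvAddrs (pvEnt c) s) (fun a => a) false).map
          (fun a => (a, s)))
        (pvU (pvEnt c))
      · intro s _
        have hnd := pvAddrsNodup (pvEnt c) hentnd s
        have hle := PySem.List.sorted_pairwise (pvAddrs (pvEnt c) s) (fun a => a)
        have hne : (PySem.List.sorted (pvAddrs (pvEnt c) s) (fun a => a) false).Nodup :=
          ((PySem.List.sorted_perm _ _ _).nodup_iff).mpr hnd
        have hlt := (hle.and hne).imp (fun hab => lt_of_le_of_ne hab.1 hab.2)
        exact hlt.map _ (fun a b hab => hab)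
      · intro s _ e he
        obtain ⟨a, _, rfl⟩ := List.mem_map.mp he
        rfl
      · refine (pvIdxPairwise (pvU (pvEnt c))
          (by rw [pvU]; exact PySem.Set.nodup_ofList _)).imp ?_
        intro s t hst
        exact_mod_cast hst
  rw [hsorted]
  rw [PySem.Dict.items_foldl_insert_fresh (pvSeq (pvEnt c)) (fun e => e.1) _ PySem.Dict.empty
    (fun e _ => PySem.Dict.contains_empty e.1)
    ((List.Perm.nodup_iff ((pvSeqPerm (pvEnt c)).map (fun e => e.1))).mpr hentnd)]
  rw [show (PySem.Dict.empty : PySem.Dict Int String).items = [] from rfl, List.nil_append]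
  have hcount : ∀ s : String, ((pvEnt c).foldl
      (fun d e => d.insert e.2 (d.getD e.2 0 + 1)) PySem.Dict.empty).getD s 0
      = ((pvSyms (pvEnt c)).count s : Int) := by
    intro s
    rw [show (pvEnt c).foldl (fun d e => d.insert e.2 (d.getD e.2 0 + 1))
          (PySem.Dict.empty : PySem.Dict String Int)
        = ((pvEnt c).map (fun e => e.2)).foldl
            (fun d x => d.insert x (d.getD x 0 + 1)) PySem.Dict.empty
      from (List.foldl_map (f := fun (e : Int × String) => e.2)
        (g := fun (d : PySem.Dict String Int) x => d.insert x (d.getD x 0 + 1))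
        (l := pvEnt c) (init := PySem.Dict.empty)).symm]
    rw [PySem.Dict.getD_foldl_insert_add_one, PySem.Dict.getD_empty, zero_add, pvSyms]
  apply List.map_congr_left
  intro e _
  rw [hcount e.2, pvLab]
  simp [Nat.cast_eq_one]

-- ===== VERDICT (by name: the statement is the Claim_ definition above) =====
theorem finalize_segment_symbols_py_spec : Claim_equal_finalize_segment_symbols_py := by
  intro c _ hpre
  show finalize_segment_symbols_py c = finalize_segment_symbols_py_alt c
  rw [pvMainA c hpre, pvMainB c hpre]
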